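-- pv_equiv track=rewrite | github.com/vuong83op/tool | predictor.py | _predict_from_cycle
-- ===== SOURCE A (Python) =====
-- def _predict_from_cycle(cycle_data, current_value):
--     """Dự đoán dựa trên chu kỳ"""
--     if not cycle_data:
--         return None
--
--     # Tìm giá trị có tần suất cao nhất trong chu kỳ
--     max_freq = max(cycle_data.values())
--     high_freq_values = [v for v, f in cycle_data.items() if f == max_freq]
--
--     # Chọn giá trị gần nhất với giá trị hiện tại
--     if high_freq_values:
--         return min(high_freq_values, key=lambda x: abs(x - current_value))
--
--     return None
-- ===== SOURCE B (Python) =====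
-- def _predict_from_cycle(cycle_data, current_value):
--     """Single pass over the items: keep the best (value, freq, distance) seen so far."""
--     best = None  # (value, freq, distance)
--     for v, f in cycle_data.items():
--         d = abs(v - current_value)
--         if best is None or f > best[1] or (f == best[1] and d < best[2]):
--             best = (v, f, d)
--     return best[0] if best is not None else None
-- ===== Notes on version B (the rewrite author's own statement) =====
-- stated objective: alternative
-- what changed: Replaces the three-pass structure (max over values, filter at max frequency, min by distance) with one linear pass over the items maintaining the best (value, freq, distance) triple, with strict comparisons so the earliest item wins ties.
import Mathlib
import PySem

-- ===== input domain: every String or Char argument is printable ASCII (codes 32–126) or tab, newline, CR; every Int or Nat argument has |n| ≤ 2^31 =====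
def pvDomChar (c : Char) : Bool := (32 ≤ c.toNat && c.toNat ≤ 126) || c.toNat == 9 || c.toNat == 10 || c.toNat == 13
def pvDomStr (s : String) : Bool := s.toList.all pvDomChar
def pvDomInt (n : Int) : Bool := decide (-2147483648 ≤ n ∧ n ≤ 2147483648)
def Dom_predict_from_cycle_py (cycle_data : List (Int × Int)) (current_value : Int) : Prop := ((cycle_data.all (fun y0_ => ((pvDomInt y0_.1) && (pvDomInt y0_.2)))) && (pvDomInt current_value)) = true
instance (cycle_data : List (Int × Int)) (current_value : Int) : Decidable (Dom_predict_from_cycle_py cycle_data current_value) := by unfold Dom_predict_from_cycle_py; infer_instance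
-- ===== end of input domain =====

-- B replaces A's three passes (max frequency, filter, min by distance) with one linear pass
-- keeping the best (value, freq, distance) triple; same O(n) cost, different decomposition.


-- ===== PORT A =====
-- A: three passes — max over frequencies, filter at the max frequency, min by distance.
def predict_from_cycle_py (cycle_data : List (Int × Int)) (current_value : Int) : Option Int :=
  if cycle_data = [] then none
  else
    match PySem.List.max? (cycle_data.map (fun p => p.2)) (fun y => y) with
    | none => none  -- unreachable: cycle_data ≠ [] (Python's max would raise on [])
    | some max_freq =>
      let high_freq_values := (cycle_data.filter (fun p => p.2 = max_freq)).map (fun p => p.1)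
      if high_freq_values = [] then
        none
      else
        PySem.List.min? high_freq_values (fun x => |x - current_value|)

-- ===== PORT B =====
-- B: one linear pass maintaining the best (value, freq, distance) triple; strict
-- comparisons so the earliest item wins ties.
def predict_from_cycle_py_alt (cycle_data : List (Int × Int)) (current_value : Int) : Option Int :=
  let best := cycle_data.foldl
    (fun best p =>
      let d := |p.1 - current_value|
      match best with
      | none => some (p.1, p.2, d)
      | some (bv, bf, bd) =>
        if p.2 > bf ∨ (p.2 = bf ∧ d < bd) then some (p.1, p.2, d)
        else some (bv, bf, bd))
    none
  match best with
  | none => none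
  | some (bv, _, _) => some bv

-- ===== PRECONDITION & SPEC =====
def Spec_predict_from_cycle_py (cycle_data : List (Int × Int)) (current_value : Int) (out : Option Int) : Prop := out = predict_from_cycle_py_alt cycle_data current_value
instance (cycle_data : List (Int × Int)) (current_value : Int) (out : Option Int) : Decidable (Spec_predict_from_cycle_py cycle_data current_value out) := by unfold Spec_predict_from_cycle_py; infer_instance

-- ===== CLAIM (what is proved, stated in full; the proofs are below) =====
def Claim_equal_predict_from_cycle_py : Prop := ∀ (cycle_data : List (Int × Int)) (current_value : Int), Dom_predict_from_cycle_py cycle_data current_value → Spec_predict_from_cycle_py cycle_data current_value (predict_from_cycle_py cycle_data current_value)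

-- ===== LEMMAS AND PROOFS =====

-- B's loop step, named for the proofs below.
def pvStepB (current_value : Int) (best : Option (Int × Int × Int)) (p : Int × Int) :
    Option (Int × Int × Int) :=
  let d := |p.1 - current_value|
  match best with
  | none => some (p.1, p.2, d)
  | some (bv, bf, bd) =>
    if p.2 > bf ∨ (p.2 = bf ∧ d < bd) then some (p.1, p.2, d)
    else some (bv, bf, bd)

lemma altB_eq_foldl (cycle_data : List (Int × Int)) (current_value : Int) :
    predict_from_cycle_py_alt cycle_data current_value =
      match cycle_data.foldl (pvStepB current_value) none with
      | none => none
      | some (bv, _, _) => some bv := rfl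

-- Loop invariant, proved by induction from the right: on a nonempty list B's
-- accumulator holds exactly A's answer, the max frequency, and its distance.
lemma invariant (c : Int) :
    ∀ (l : List (Int × Int)), l ≠ [] →
      ∃ v f, l.foldl (pvStepB c) none = some (v, f, |v - c|) ∧
        PySem.List.max? (l.map (fun p => p.2)) (fun y => y) = some f ∧
        PySem.List.min? ((l.filter (fun p => p.2 = f)).map (fun p => p.1))
          (fun x => |x - c|) = some v := by
  intro l
  induction l using List.reverseRecOn with
  | nil => intro h; exact absurd rfl h
  | append_singleton t x ih =>
    intro _
    by_cases ht : t = []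
    · subst ht
      refine ⟨x.1, x.2, ?_, ?_, ?_⟩ <;>
        simp [pvStepB, PySem.List.max?, PySem.List.min?]
    · obtain ⟨v, f, hB, hM, hm⟩ := ih ht
      have hmax : ∀ p ∈ t, p.2 ≤ f := by
        intro p hp
        exact PySem.List.max?_isMax hM p.2 (List.mem_map_of_mem hp)
      have hMstep : PySem.List.max? ((t ++ [x]).map (fun p => p.2)) (fun y => y) =
          some (if f < x.2 then x.2 else f) := by
        simp only [PySem.List.max?, List.map_append, List.foldl_append] at hM ⊢
        rw [hM]
        by_cases hc : f < x.2 <;> simp [hc]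
      rcases lt_trichotomy f x.2 with hlt | heq | hgt
      · -- new element has strictly higher frequency: everything resets to x
        refine ⟨x.1, x.2, ?_, ?_, ?_⟩
        · simp only [List.foldl_append, List.foldl_cons, List.foldl_nil, hB]
          simp [pvStepB, hlt]
        · rw [hMstep]; simp [hlt]
        · have hfe : t.filter (fun p => p.2 = x.2) = [] := by
            rw [List.filter_eq_nil_iff]
            intro p hp
            simp only [decide_eq_true_eq]
            exact fun h => absurd (h ▸ hmax p hp) (not_le.mpr hlt)
          rw [List.filter_append, hfe]
          simp [PySem.List.min?]
      · -- equal frequency: the filtered list gains x at the end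
        have hmin : PySem.List.min?
            (((t.filter (fun p => p.2 = f)).map (fun p => p.1)) ++ [x.1])
              (fun y => |y - c|) =
            (if |x.1 - c| < |v - c| then some x.1 else some v) := by
          simp only [PySem.List.min?, List.foldl_append] at hm ⊢
          rw [hm]
          by_cases hd : |x.1 - c| < |v - c| <;> simp [hd]
        refine ⟨if |x.1 - c| < |v - c| then x.1 else v, f, ?_, ?_, ?_⟩
        · simp only [List.foldl_append, List.foldl_cons, List.foldl_nil, hB]
          by_cases hd : |x.1 - c| < |v - c| <;> simp [pvStepB, hd, heq]
        · rw [hMstep]; simp [heq]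
        · rw [List.filter_append]
          have hx : [x].filter (fun p => p.2 = f) = [x] := by simp [heq]
          rw [hx]
          simp only [List.map_append, List.map_cons, List.map_nil]
          rw [hmin]
          by_cases hd : |x.1 - c| < |v - c| <;> simp [hd]
      · -- lower frequency: nothing changes
        refine ⟨v, f, ?_, ?_, ?_⟩
        · simp only [List.foldl_append, List.foldl_cons, List.foldl_nil, hB]
          simp [pvStepB, not_lt.mpr (le_of_lt hgt), (ne_of_lt hgt)]
        · rw [hMstep]; simp [not_lt.mpr (le_of_lt hgt)]
        · have hfe : (t ++ [x]).filter (fun p => p.2 = f) = t.filter (fun p => p.2 = f) := by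
            rw [List.filter_append]
            simp [ne_of_lt hgt]
          rw [hfe]; exact hm

-- ===== VERDICT (by name: the statement is the Claim_ definition above) =====
theorem predict_from_cycle_py_spec : Claim_equal_predict_from_cycle_py := by
  intro cycle_data current_value _
  unfold Spec_predict_from_cycle_py
  by_cases h : cycle_data = []
  · subst h; rfl
  · obtain ⟨v, f, hB, hM, hm⟩ := invariant current_value cycle_data h
    rw [altB_eq_foldl, hB]
    unfold predict_from_cycle_py
    rw [if_neg h, hM]
    have hne : ((cycle_data.filter (fun p => p.2 = f)).map (fun p => p.1)) ≠ [] := by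
      intro he
      rw [he] at hm
      simp [PySem.List.min?] at hm
    simp only [hne, hm]
    simp
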